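-- pv_equiv track=rewrite | github.com/NesoDev/athena-casino-ea | src/core/lightning_roulette/auxiliary_functions.py | is_equal_zones
-- ===== SOURCE A (Python) =====
-- def obtain_zone(number: int) -> int:
--     if number == 0:
--         return 0
--     elif 1 <= number <= 12:
--         return 1
--     elif 13 <= number <= 24:
--         return 2
--     else:
--         return 3
--
-- def is_equal_zones(numbers: list) -> bool:
--     if not numbers:
--         return False
--     zone = obtain_zone(int(numbers[0]))
--     for number in numbers[1:]:
--         if obtain_zone(int(number)) != zone:
--             return False
--     return True
-- ===== SOURCE B (Python) =====
-- def obtain_zone(number: int) -> int: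
--     if number == 0:
--         return 0
--     elif 1 <= number <= 12:
--         return 1
--     elif 13 <= number <= 24:
--         return 2
--     else:
--         return 3
--
-- def common_zone(numbers: list):
--     """Divide and conquer: the common zone of all elements, or None if they disagree.
--     Only called on non-empty lists."""
--     if len(numbers) == 1:
--         return obtain_zone(int(numbers[0]))
--     mid = len(numbers) // 2
--     left = common_zone(numbers[:mid])
--     right = common_zone(numbers[mid:])
--     if left is not None and left == right:
--         return left
--     return None
--
-- def is_equal_zones(numbers: list) -> bool:
--     if not numbers:
--         return False
--     return common_zone(numbers) is not None
-- ===== Notes on version B (the rewrite author's own statement) =====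
-- stated objective: alternative
-- what changed: B replaces A's linear reference-zone scan with a divide-and-conquer recursion: common_zone splits the list in half, computes each half's common zone (or None), and merges by equality; is_equal_zones tests the result for None.
import Mathlib
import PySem

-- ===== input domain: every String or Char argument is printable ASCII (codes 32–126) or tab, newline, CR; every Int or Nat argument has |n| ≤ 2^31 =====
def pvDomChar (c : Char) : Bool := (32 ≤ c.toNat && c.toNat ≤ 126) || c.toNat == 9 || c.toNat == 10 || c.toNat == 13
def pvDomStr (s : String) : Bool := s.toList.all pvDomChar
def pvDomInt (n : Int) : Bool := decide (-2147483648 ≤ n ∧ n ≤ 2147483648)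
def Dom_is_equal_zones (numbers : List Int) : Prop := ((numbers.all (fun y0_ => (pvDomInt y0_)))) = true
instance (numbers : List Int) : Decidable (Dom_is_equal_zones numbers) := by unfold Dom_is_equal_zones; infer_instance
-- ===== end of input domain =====

-- B checks zone-uniformity by divide-and-conquer (split in half, merge common zones) instead of A's linear reference-compare loop; same cost, different algorithm.


-- ===== PORT A =====
def obtain_zone (number : Int) : Int :=
  if number = 0 then 0
  else if 1 ≤ number ∧ number ≤ 12 then 1
  else if 13 ≤ number ∧ number ≤ 24 then 2
  else 3

-- the 'for number in numbers[1:]' loop with its early return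
def isEqualZonesLoop (zone : Int) : List Int → Bool
  | [] => true
  | number :: rest =>
    if obtain_zone number ≠ zone then false else isEqualZonesLoop zone rest

def is_equal_zones (numbers : List Int) : Bool :=
  match numbers with
  | [] => false
  | first :: rest => isEqualZonesLoop (obtain_zone first) rest

-- ===== PORT B =====
-- common_zone is only called on non-empty lists in Source B; the [] branch is a totality guard.
-- numbers[:mid]/numbers[mid:] with 0 ≤ mid ≤ len are exactly take/drop.
def common_zone (l : List Int) : Option Int :=
  if l.length = 0 then none
  else if l.length = 1 then some (obtain_zone l.headI)
  else
    let mid := l.length / 2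
    let left := common_zone (l.take mid)
    let right := common_zone (l.drop mid)
    match left, right with
    | some a, some b => if a = b then some a else none
    | _, _ => none
termination_by l.length
decreasing_by all_goals simp [List.length_take, List.length_drop]; omega

def is_equal_zones_alt (numbers : List Int) : Bool :=
  match numbers with
  | [] => false
  | _ => (common_zone numbers).isSome

-- ===== PRECONDITION & SPEC =====
def Spec_is_equal_zones (numbers : List Int) (out : Bool) : Prop := out = is_equal_zones_alt numbers
instance (numbers : List Int) (out : Bool) : Decidable (Spec_is_equal_zones numbers out) := by unfold Spec_is_equal_zones; infer_instance

-- ===== CLAIM (what is proved, stated in full; the proofs are below) =====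
def Claim_equal_is_equal_zones : Prop := ∀ (numbers : List Int), Dom_is_equal_zones numbers → Spec_is_equal_zones numbers (is_equal_zones numbers)

-- ===== LEMMAS AND PROOFS =====

-- characterisation of B's recursion: on non-empty lists the common zone is some z iff every element has zone z
theorem common_zone_some_aux (n : Nat) : ∀ (l : List Int), l.length ≤ n → l ≠ [] →
    ∀ z : Int, (common_zone l = some z ↔ ∀ x ∈ l, obtain_zone x = z) := by
  induction n with
  | zero => intro l hl hne; simp at hl; exact absurd hl hne
  | succ n ih =>
    intro l hl hne z
    by_cases h1 : l.length = 1
    · obtain ⟨x, hx⟩ : ∃ x, l = [x] := by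
        cases l with
        | nil => simp at h1
        | cons a t => cases t with
          | nil => exact ⟨a, rfl⟩
          | cons b t => simp at h1
      subst hx
      rw [common_zone]
      simp
    · have h0 : l.length ≠ 0 := by simpa using hne
      have h2 : 2 ≤ l.length := by omega
      rw [common_zone]
      simp only [h0, h1, if_false]
      set mid := l.length / 2 with hmid
      have hmid1 : 1 ≤ mid := by omega
      have hmidlt : mid < l.length := by omega
      have htlen : (l.take mid).length = mid := by simp; omega
      have hdlen : (l.drop mid).length = l.length - mid := by simp
      have htne : l.take mid ≠ [] := by
        intro h; rw [h] at htlen; simp at htlen; omega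
      have hdne : l.drop mid ≠ [] := by
        intro h; rw [h] at hdlen; simp at hdlen; omega
      have iht := ih (l.take mid) (by omega) htne
      have ihd := ih (l.drop mid) (by omega) hdne
      have hsplit : ∀ z' : Int, (∀ x ∈ l, obtain_zone x = z') ↔
          ((∀ x ∈ l.take mid, obtain_zone x = z') ∧ (∀ x ∈ l.drop mid, obtain_zone x = z')) := by
        intro z'
        constructor
        · intro h
          exact ⟨fun x hx => h x (List.mem_of_mem_take hx),
                 fun x hx => h x (List.mem_of_mem_drop hx)⟩
        · intro ⟨h₁, h₂⟩ x hx
          rw [← List.take_append_drop mid l] at hx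
          rcases List.mem_append.mp hx with h | h
          · exact h₁ x h
          · exact h₂ x h
      rcases hL : common_zone (l.take mid) with _ | a
      · simp only []
        constructor
        · intro h; simp at h
        · intro h
          have := (iht z).mpr ((hsplit z).mp h).1
          rw [hL] at this; simp at this
      · rcases hR : common_zone (l.drop mid) with _ | b
        · simp only []
          constructor
          · intro h; simp at h
          · intro h
            have := (ihd z).mpr ((hsplit z).mp h).2
            rw [hR] at this; simp at this
        · simp only []
          split_ifs with hab
          · subst hab
            have ha := (iht a).mp hL
            have hb := (ihd a).mp hR
            constructor
            · intro h
              injection h with h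
              exact (hsplit z).mpr ⟨h ▸ ha, h ▸ hb⟩
            · intro h
              obtain ⟨x, hx⟩ := List.exists_mem_of_ne_nil _ htne
              have haz : a = z := (ha x hx).symm.trans (h x (List.mem_of_mem_take hx))
              rw [haz]
          · constructor
            · intro h; simp at h
            · intro h
              have h1' := (iht z).mpr ((hsplit z).mp h).1
              have h2' := (ihd z).mpr ((hsplit z).mp h).2
              rw [hL] at h1'; rw [hR] at h2'
              simp at h1' h2'
              exact ((hab (h1'.trans h2'.symm))).elim

theorem common_zone_some (l : List Int) (hne : l ≠ []) (z : Int) :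
    common_zone l = some z ↔ ∀ x ∈ l, obtain_zone x = z :=
  common_zone_some_aux l.length l le_rfl hne z

theorem common_zone_isSome (l : List Int) (hne : l ≠ []) :
    (common_zone l).isSome = l.all (fun x => obtain_zone x == obtain_zone l.headI) := by
  rcases hC : common_zone l with _ | z
  · simp only [Option.isSome_none]
    cases hq : (l.all fun x => obtain_zone x == obtain_zone l.headI) with
    | false => rfl
    | true =>
      exfalso
      have hall : ∀ x ∈ l, obtain_zone x = obtain_zone l.headI := by
        intro x hx
        simpa using List.all_eq_true.mp hq x hx
      have := (common_zone_some l hne _).mpr hall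
      rw [hC] at this; simp at this
  · simp only [Option.isSome_some]
    have hall := (common_zone_some l hne z).mp hC
    have hhead : l.headI ∈ l := by
      cases l with
      | nil => exact absurd rfl hne
      | cons a t => simp [List.headI]
    symm
    rw [List.all_eq_true]
    intro x hx
    simp [hall x hx, hall l.headI hhead]

theorem loop_eq_all (l : List Int) (z : Int) :
    isEqualZonesLoop z l = l.all (fun x => obtain_zone x == z) := by
  induction l with
  | nil => rfl
  | cons x xs ih =>
    by_cases hx : obtain_zone x = z <;> simp [isEqualZonesLoop, hx, ih]

-- ===== VERDICT (by name: the statement is the Claim_ definition above) =====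
theorem is_equal_zones_spec : Claim_equal_is_equal_zones := by
  intro numbers _
  unfold Spec_is_equal_zones
  cases numbers with
  | nil => rfl
  | cons first rest =>
    simp only [is_equal_zones, is_equal_zones_alt, loop_eq_all,
      common_zone_isSome (first :: rest) (by simp)]
    simp
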